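-- pv_equiv track=rewrite | github.com/wrongways/dnsmasq | optimize_blacklist.py | domains_by_depth
-- ===== SOURCE A (Python) =====
-- def domains_by_depth(blacklist):
-- # build a dict with domain depth as key (.com = 1, .co.uk = 2, ibm.com=2 etc)
-- 	domain_depth_map = {}
-- 	for domain in blacklist:
-- 		components = domain.split('.')
-- 		depth = len(components)
-- 		domains_for_depth = domain_depth_map.get(depth, [])
-- 		domains_for_depth.append(domain)
-- 		domain_depth_map[depth] = domains_for_depth
--
-- 	# sort domain_depth_map by ascending depth
-- 	return {k: domain_depth_map[k] for k in sorted(domain_depth_map.keys())}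
-- ===== SOURCE B (Python) =====
-- def domains_by_depth(blacklist):
--     depth = lambda d: len(d.split('.'))
--     return {k: [d for d in blacklist if depth(d) == k]
--             for k in sorted({depth(d) for d in blacklist})}
-- ===== Notes on version B (the rewrite author's own statement) =====
-- stated objective: idiomatic
-- what changed: Replaces the imperative one-pass dict accumulation (get-append-assign per domain, then re-keying by sorted keys) with a declarative dict comprehension: sort the set of distinct depths and build each depth's group directly with a list-comprehension filter over the blacklist.
import Mathlib
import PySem

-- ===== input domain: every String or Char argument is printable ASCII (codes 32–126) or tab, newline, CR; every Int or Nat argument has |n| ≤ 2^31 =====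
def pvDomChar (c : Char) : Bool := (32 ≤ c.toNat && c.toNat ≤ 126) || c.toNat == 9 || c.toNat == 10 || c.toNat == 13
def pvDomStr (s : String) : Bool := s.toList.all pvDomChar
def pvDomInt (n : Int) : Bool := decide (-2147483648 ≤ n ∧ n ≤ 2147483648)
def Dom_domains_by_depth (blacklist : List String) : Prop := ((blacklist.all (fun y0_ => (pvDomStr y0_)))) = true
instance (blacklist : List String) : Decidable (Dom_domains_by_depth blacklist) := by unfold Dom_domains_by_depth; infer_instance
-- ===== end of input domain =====

-- B replaces A's imperative dict accumulation by sorting the set of distinct depths and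
-- building each group with a filter over the blacklist (idiomatic, same results).

-- len(domain.split('.')); the separator "." is non-empty, so split? is always `some`
def pvDepth (s : String) : Int := (((PySem.Str.split? s ".").getD []).length : Int)

-- ===== PORT A =====
def domains_by_depth (blacklist : List String) : List (Int × List String) :=
  -- domain_depth_map[depth] = domain_depth_map.get(depth, []) + [domain]  (get/append/assign = Dict.modify)
  let domain_depth_map : PySem.Dict Int (List String) :=
    blacklist.foldl (fun d domain => d.modify (pvDepth domain) [] (fun l => l ++ [domain]))
      PySem.Dict.empty
  -- {k: domain_depth_map[k] for k in sorted(domain_depth_map.keys())}; k ∈ keys, so d[k] never raises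
  (PySem.List.sorted domain_depth_map.keys (fun k => k)).map
    (fun k => (k, domain_depth_map.getD k []))

-- ===== PORT B =====
def domains_by_depth_alt (blacklist : List String) : List (Int × List String) :=
  (PySem.List.sorted (PySem.Set.ofList (blacklist.map pvDepth)) (fun k => k)).map
    (fun k => (k, blacklist.filter (fun d => pvDepth d == k)))

-- ===== PRECONDITION & SPEC =====
def Spec_domains_by_depth (blacklist : List String) (out : List (Int × List String)) : Prop := out = domains_by_depth_alt blacklist
instance (blacklist : List String) (out : List (Int × List String)) : Decidable (Spec_domains_by_depth blacklist out) := by unfold Spec_domains_by_depth; infer_instance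

-- ===== CLAIM (what is proved, stated in full; the proofs are below) =====
def Claim_equal_domains_by_depth : Prop := ∀ (blacklist : List String), Dom_domains_by_depth blacklist → Spec_domains_by_depth blacklist (domains_by_depth blacklist)

-- ===== LEMMAS AND PROOFS =====

-- the accumulated dict's keys are the distinct depths, in first-occurrence order
theorem pv_keys (blacklist : List String) :
    (blacklist.foldl (fun d domain => d.modify (pvDepth domain) [] (fun l => l ++ [domain]))
      (PySem.Dict.empty : PySem.Dict Int (List String))).keys
    = PySem.Set.ofList (blacklist.map pvDepth) := by
  have h := PySem.Dict.keys_foldl_modify_key blacklist pvDepth ([] : List String)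
    (fun _ domain l => l ++ [domain]) (PySem.Dict.empty : PySem.Dict Int (List String))
  simpa [PySem.Set.update_nil_left] using h

-- the accumulated dict's value at any depth c is the filter of the blacklist at that depth
theorem pv_getD (blacklist : List String) (c : Int) :
    (blacklist.foldl (fun d domain => d.modify (pvDepth domain) [] (fun l => l ++ [domain]))
      (PySem.Dict.empty : PySem.Dict Int (List String))).getD c []
    = blacklist.filter (fun s => pvDepth s == c) := by
  have hfold :
      blacklist.foldl (fun d domain => d.modify (pvDepth domain) [] (fun l => l ++ [domain]))
        (PySem.Dict.empty : PySem.Dict Int (List String))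
      = (blacklist.map (fun s => (pvDepth s, s))).foldl
          (fun d p => d.modify p.1 [] (fun l => l ++ [p.2]))
          (PySem.Dict.empty : PySem.Dict Int (List String)) := by
    rw [List.foldl_map]
  rw [hfold, PySem.Dict.getD_foldl_modify_append]
  simp [List.filter_map, Function.comp_def]

-- ===== VERDICT (by name: the statement is the Claim_ definition above) =====
theorem domains_by_depth_spec : Claim_equal_domains_by_depth := by
  intro blacklist _
  unfold Spec_domains_by_depth domains_by_depth domains_by_depth_alt
  simp only [pv_keys, pv_getD]
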